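-- pv_equiv track=rewrite | github.com/grapemix/theory | theory/command/indentFormatFix.py | _convertDjango
-- ===== SOURCE A (Python) =====
-- def _convertDjango(lines):
--   newLines = []
--   for i in lines:
--     j = i.replace("Django", "Theory")
--     j = j.replace("django", "theory")
--     j = j.replace("DJANGO", "THEORY")
--     newLines.append(j)
--   return newLines
-- ===== SOURCE B (Python) =====
-- # B: one table-driven left-to-right pass per line (scan once, substitute at each hit)
-- # instead of A's three chained full-string replace passes. Same output; not faster in
-- # CPython (str.replace runs in C), so the objective is 'alternative'.
-- def _convert_line(s):
--   parts = []
--   i = 0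
--   n = len(s)
--   while i < n:
--     w = s[i:i + 6]
--     if w == "Django":
--       parts.append("Theory")
--       i += 6
--     elif w == "django":
--       parts.append("theory")
--       i += 6
--     elif w == "DJANGO":
--       parts.append("THEORY")
--       i += 6
--     else:
--       parts.append(s[i])
--       i += 1
--   return "".join(parts)
--
-- def _convertDjango(lines):
--   return [_convert_line(i) for i in lines]
-- ===== Notes on version B (the rewrite author's own statement) =====
-- stated objective: alternative
-- what changed: B replaces A's three chained full-string replace passes per line by a single left-to-right scan that checks the 6-char window against the three tokens and substitutes in one pass.
import Mathlib
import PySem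

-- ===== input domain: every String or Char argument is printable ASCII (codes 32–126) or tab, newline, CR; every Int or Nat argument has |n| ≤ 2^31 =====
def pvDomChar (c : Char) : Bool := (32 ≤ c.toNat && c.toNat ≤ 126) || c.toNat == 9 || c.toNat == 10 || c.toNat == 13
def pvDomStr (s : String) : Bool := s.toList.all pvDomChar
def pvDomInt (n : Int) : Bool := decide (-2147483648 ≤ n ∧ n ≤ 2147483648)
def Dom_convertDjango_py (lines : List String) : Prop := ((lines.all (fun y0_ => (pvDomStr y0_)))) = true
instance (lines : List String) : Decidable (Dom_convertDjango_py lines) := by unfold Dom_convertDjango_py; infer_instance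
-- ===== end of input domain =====

-- B changes the per-line algorithm: one left-to-right 6-char-window scan with substitution
-- instead of A's three chained full-string replaces (objective: alternative, not faster).

-- ===== PORT A =====
-- literal port of _convertDjango: accumulator list, three chained replaces per line
def convertDjango_py (lines : List String) : List String :=
  lines.foldl (fun newLines i =>
    let j := PySem.Str.replace i "Django" "Theory"
    let j := PySem.Str.replace j "django" "theory"
    let j := PySem.Str.replace j "DJANGO" "THEORY"
    newLines ++ [j]) []

-- ===== PORT B =====
-- port of Source B's _convert_line: scan once, compare the 6-char window, substitute or copy one char
def pvConvLine : List Char → List Char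
  | [] => []
  | c :: t =>
    if (c :: t).take 6 = "Django".toList then
      "Theory".toList ++ pvConvLine ((c :: t).drop 6)
    else if (c :: t).take 6 = "django".toList then
      "theory".toList ++ pvConvLine ((c :: t).drop 6)
    else if (c :: t).take 6 = "DJANGO".toList then
      "THEORY".toList ++ pvConvLine ((c :: t).drop 6)
    else
      c :: pvConvLine t
termination_by l => l.length
decreasing_by all_goals simp

def convertDjango_py_alt (lines : List String) : List String :=
  lines.map (fun s => String.ofList (pvConvLine s.toList))

-- ===== PRECONDITION & SPEC =====
def Spec_convertDjango_py (lines : List String) (out : List String) : Prop := out = convertDjango_py_alt lines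
instance (lines : List String) (out : List String) : Decidable (Spec_convertDjango_py lines out) := by unfold Spec_convertDjango_py; infer_instance

-- ===== CLAIM (what is proved, stated in full; the proofs are below) =====
def Claim_equal_convertDjango_py : Prop := ∀ (lines : List String), Dom_convertDjango_py lines → Spec_convertDjango_py lines (convertDjango_py lines)

-- ===== LEMMAS AND PROOFS =====

-- proof-side structural (fuel-free) form of Python's str.replace for a 6-char pattern
def pvRepl6 (pat rep : List Char) : List Char → List Char
  | [] => []
  | c :: t =>
    if pat <+: (c :: t) then rep ++ pvRepl6 pat rep ((c :: t).drop 6)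
    else c :: pvRepl6 pat rep t
termination_by l => l.length
decreasing_by all_goals simp

theorem pvGo_eq (pat rep : List Char) (hlen : pat.length = 6) :
    ∀ fuel l acc, l.length ≤ fuel →
      PySem.Chars.replace.go pat rep fuel l acc = acc.reverse ++ pvRepl6 pat rep l := by
  intro fuel
  induction fuel with
  | zero =>
    intro l acc h
    have hl : l = [] := by cases l <;> simp_all
    subst hl
    simp [PySem.Chars.replace.go, pvRepl6]
  | succ n ih =>
    intro l acc h
    cases l with
    | nil => simp [PySem.Chars.replace.go, pvRepl6]
    | cons c t =>
      rw [PySem.Chars.replace.go]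
      by_cases hp : pat <+: (c :: t)
      · have hp' : pat.isPrefixOf (c :: t) = true := List.isPrefixOf_iff_prefix.mpr hp
        rw [if_pos hp', hlen, ih _ _ (by simp at h ⊢; omega)]
        rw [pvRepl6, if_pos hp]
        simp
      · have hp' : pat.isPrefixOf (c :: t) = false := by
          rw [Bool.eq_false_iff]; intro hc; exact hp (List.isPrefixOf_iff_prefix.mp hc)
        rw [if_neg (by simp [hp']), ih _ _ (by simp at h ⊢; omega)]
        rw [pvRepl6, if_neg hp]
        simp

theorem pvReplace_eq (pat rep : List Char) (hlen : pat.length = 6) (s : List Char) :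
    PySem.Chars.replace s pat rep = pvRepl6 pat rep s := by
  have hne : pat.isEmpty = false := by cases pat <;> simp_all
  rw [PySem.Chars.replace, hne]
  simpa using pvGo_eq pat rep hlen s.length s [] le_rfl

theorem pvSkip (pat rep : List Char) :
    ∀ (w x : List Char), (∀ i, i < w.length → ¬ pat <+: (w.drop i ++ x)) →
      pvRepl6 pat rep (w ++ x) = w ++ pvRepl6 pat rep x := by
  intro w
  induction w with
  | nil => intro x _; simp
  | cons c w' ih =>
    intro x h
    rw [List.cons_append, pvRepl6, if_neg (by simpa using h 0 (by simp))]
    rw [ih x (fun i hi => by simpa using h (i + 1) (by simpa using hi))]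
    simp

theorem pvReflect (pat rep V : List Char)
    (hV : ∀ v y, v <:+ V → v ≠ [] → ¬ v <+: rep ++ y) :
    ∀ t v, v <:+ V → v <+: pvRepl6 pat rep t → v <+: t := by
  intro t
  induction t using pvRepl6.induct pat with
  | case1 => intro v _ hp; simpa [pvRepl6] using hp
  | case2 c t hp _ => -- prefix branch
    intro v hv hpre
    cases v with
    | nil => simp
    | cons v0 v' =>
      rw [pvRepl6, if_pos hp] at hpre
      exact absurd hpre (hV _ _ hv (by simp))
  | case3 c t hp ih =>
    intro v hv hpre
    cases v with
    | nil => simp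
    | cons v0 v' =>
      rw [pvRepl6, if_neg hp] at hpre
      rw [List.cons_prefix_cons] at hpre
      obtain ⟨rfl, hpre'⟩ := hpre
      have hv' : v' <:+ V := (List.suffix_cons v0 v').trans hv
      exact List.cons_prefix_cons.mpr ⟨rfl, ih v' hv' hpre'⟩

theorem pvHit (pat rep : List Char) (u : List Char) (h6 : pat.length = 6) :
    pvRepl6 pat rep (pat ++ u) = rep ++ pvRepl6 pat rep u := by
  cases pat with
  | nil => simp at h6
  | cons p ps =>
    rw [List.cons_append, pvRepl6, if_pos (by rw [← List.cons_append]; exact (p :: ps).prefix_append u)]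
    congr 1
    rw [← List.cons_append, ← h6, List.drop_left]

theorem pvTake6 (pat l : List Char) (h6 : pat.length = 6) : l.take 6 = pat ↔ pat <+: l := by
  constructor
  · intro h; rw [← h]; exact List.take_prefix 6 l
  · intro h; rw [List.prefix_iff_eq_take.mp h, h6]

theorem pvConvHit1 (u : List Char) :
    pvConvLine ("Django".toList ++ u) = "Theory".toList ++ pvConvLine u := by
  show pvConvLine ('D' :: ("jango".toList ++ u)) = _
  rw [pvConvLine]
  rw [if_pos (by rw [pvTake6 _ _ (by rfl)]; exact List.prefix_append _ _)]
  congr 1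

theorem pvConvHit2 (u : List Char) :
    pvConvLine ("django".toList ++ u) = "theory".toList ++ pvConvLine u := by
  show pvConvLine ('d' :: ("jango".toList ++ u)) = _
  rw [pvConvLine]
  rw [if_neg (by rw [pvTake6 _ _ (by rfl)]; simp [List.cons_prefix_cons])]
  rw [if_pos (by rw [pvTake6 _ _ (by rfl)]; exact List.prefix_append _ _)]
  congr 1

theorem pvConvHit3 (u : List Char) :
    pvConvLine ("DJANGO".toList ++ u) = "THEORY".toList ++ pvConvLine u := by
  show pvConvLine ('D' :: ("JANGO".toList ++ u)) = _
  rw [pvConvLine]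
  rw [if_neg (by rw [pvTake6 _ _ (by rfl)]; simp [List.cons_prefix_cons])]
  rw [if_neg (by rw [pvTake6 _ _ (by rfl)]; simp [List.cons_prefix_cons])]
  rw [if_pos (by rw [pvTake6 _ _ (by rfl)]; exact List.prefix_append _ _)]
  congr 1

theorem pvConvMiss (c : Char) (t : List Char)
    (h1 : ¬ "Django".toList <+: (c :: t)) (h2 : ¬ "django".toList <+: (c :: t))
    (h3 : ¬ "DJANGO".toList <+: (c :: t)) :
    pvConvLine (c :: t) = c :: pvConvLine t := by
  rw [pvConvLine, if_neg (by rw [pvTake6 _ _ (by rfl)]; exact h1),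
      if_neg (by rw [pvTake6 _ _ (by rfl)]; exact h2),
      if_neg (by rw [pvTake6 _ _ (by rfl)]; exact h3)]

theorem pvReflT (V : List Char) (hne : 'T' ∉ V) :
    ∀ t v, v <:+ V → v <+: pvRepl6 "Django".toList "Theory".toList t → v <+: t := by
  apply pvReflect
  intro v y hv hvne hp
  cases v with
  | nil => exact hvne rfl
  | cons v0 v' =>
    have hm : v0 ∈ V := by obtain ⟨w, hw⟩ := hv; rw [← hw]; simp
    have h0 : v0 = 'T' := by
      rw [show ("Theory".toList ++ y) = 'T' :: ("heory".toList ++ y) from rfl,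
          List.cons_prefix_cons] at hp
      exact hp.1
    exact hne (h0 ▸ hm)

theorem pvReflt (V : List Char) (hne : 't' ∉ V) :
    ∀ t v, v <:+ V → v <+: pvRepl6 "django".toList "theory".toList t → v <+: t := by
  apply pvReflect
  intro v y hv hvne hp
  cases v with
  | nil => exact hvne rfl
  | cons v0 v' =>
    have hm : v0 ∈ V := by obtain ⟨w, hw⟩ := hv; rw [← hw]; simp
    have h0 : v0 = 't' := by
      rw [show ("theory".toList ++ y) = 't' :: ("heory".toList ++ y) from rfl,
          List.cons_prefix_cons] at hp
      exact hp.1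
    exact hne (h0 ▸ hm)


theorem pvSkip1 (x : List Char) : pvRepl6 "django".toList "theory".toList ("Theory".toList ++ x) = "Theory".toList ++ pvRepl6 "django".toList "theory".toList x :=
  pvSkip "django".toList "theory".toList "Theory".toList x (by intro i hi; have hi6 : i < 6 := (by simpa using hi); clear hi; interval_cases i <;> simp [List.cons_prefix_cons])

theorem pvSkip2 (x : List Char) : pvRepl6 "DJANGO".toList "THEORY".toList ("Theory".toList ++ x) = "Theory".toList ++ pvRepl6 "DJANGO".toList "THEORY".toList x :=
  pvSkip "DJANGO".toList "THEORY".toList "Theory".toList x (by intro i hi; have hi6 : i < 6 := (by simpa using hi); clear hi; interval_cases i <;> simp [List.cons_prefix_cons])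

theorem pvSkip3 (x : List Char) : pvRepl6 "Django".toList "Theory".toList ("django".toList ++ x) = "django".toList ++ pvRepl6 "Django".toList "Theory".toList x :=
  pvSkip "Django".toList "Theory".toList "django".toList x (by intro i hi; have hi6 : i < 6 := (by simpa using hi); clear hi; interval_cases i <;> simp [List.cons_prefix_cons])

theorem pvSkip4 (x : List Char) : pvRepl6 "DJANGO".toList "THEORY".toList ("theory".toList ++ x) = "theory".toList ++ pvRepl6 "DJANGO".toList "THEORY".toList x :=
  pvSkip "DJANGO".toList "THEORY".toList "theory".toList x (by intro i hi; have hi6 : i < 6 := (by simpa using hi); clear hi; interval_cases i <;> simp [List.cons_prefix_cons])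

theorem pvSkip5 (x : List Char) : pvRepl6 "Django".toList "Theory".toList ("DJANGO".toList ++ x) = "DJANGO".toList ++ pvRepl6 "Django".toList "Theory".toList x :=
  pvSkip "Django".toList "Theory".toList "DJANGO".toList x (by intro i hi; have hi6 : i < 6 := (by simpa using hi); clear hi; interval_cases i <;> simp [List.cons_prefix_cons])

theorem pvSkip6 (x : List Char) : pvRepl6 "django".toList "theory".toList ("DJANGO".toList ++ x) = "DJANGO".toList ++ pvRepl6 "django".toList "theory".toList x :=
  pvSkip "django".toList "theory".toList "DJANGO".toList x (by intro i hi; have hi6 : i < 6 := (by simpa using hi); clear hi; interval_cases i <;> simp [List.cons_prefix_cons])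

theorem pvMain : ∀ (s : List Char),
    pvRepl6 "DJANGO".toList "THEORY".toList
      (pvRepl6 "django".toList "theory".toList
        (pvRepl6 "Django".toList "Theory".toList s)) = pvConvLine s := by
  have key : ∀ (n : Nat) (s : List Char), s.length ≤ n →
      pvRepl6 "DJANGO".toList "THEORY".toList
        (pvRepl6 "django".toList "theory".toList
          (pvRepl6 "Django".toList "Theory".toList s)) = pvConvLine s := by
    intro n
    induction n with
    | zero =>
      intro s h
      have hs : s = [] := by cases s <;> simp_all
      subst hs; simp [pvRepl6, pvConvLine]
    | succ n ih =>
      intro s hlen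
      cases s with
      | nil => simp [pvRepl6, pvConvLine]
      | cons c t =>
        by_cases h1 : "Django".toList <+: (c :: t)
        · obtain ⟨u, hu⟩ := h1
          have hu6 : u.length ≤ n := by
            have := congrArg List.length hu; simp at this hlen; omega
          rw [← hu, pvHit _ _ _ (by rfl), pvSkip1, pvSkip2, ih u hu6, pvConvHit1]
        · by_cases h2 : "django".toList <+: (c :: t)
          · obtain ⟨u, hu⟩ := h2
            have hu6 : u.length ≤ n := by
              have := congrArg List.length hu; simp at this hlen; omega
            rw [← hu, pvSkip3, pvHit _ _ _ (by rfl), pvSkip4, ih u hu6, pvConvHit2]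
          · by_cases h3 : "DJANGO".toList <+: (c :: t)
            · obtain ⟨u, hu⟩ := h3
              have hu6 : u.length ≤ n := by
                have := congrArg List.length hu; simp at this hlen; omega
              rw [← hu, pvSkip5, pvSkip6, pvHit _ _ _ (by rfl), ih u hu6, pvConvHit3]
            · have e1 : pvRepl6 "Django".toList "Theory".toList (c :: t)
                  = c :: pvRepl6 "Django".toList "Theory".toList t := by
                rw [pvRepl6, if_neg h1]
              have e2 : pvRepl6 "django".toList "theory".toList
                    (c :: pvRepl6 "Django".toList "Theory".toList t)
                  = c :: pvRepl6 "django".toList "theory".toList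
                      (pvRepl6 "Django".toList "Theory".toList t) := by
                rw [pvRepl6, if_neg ?hneg]
                case hneg =>
                  intro hp
                  rw [show ("django".toList : List Char) = 'd' :: "jango".toList from rfl,
                      List.cons_prefix_cons] at hp
                  obtain ⟨rfl, hp'⟩ := hp
                  have := pvReflT "jango".toList (by decide) t _ (List.suffix_refl _) hp'
                  exact h2 (by
                    rw [show ("django".toList : List Char) = 'd' :: "jango".toList from rfl]
                    exact List.cons_prefix_cons.mpr ⟨rfl, this⟩)
              have e3 : pvRepl6 "DJANGO".toList "THEORY".toList
                    (c :: pvRepl6 "django".toList "theory".toList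
                      (pvRepl6 "Django".toList "Theory".toList t))
                  = c :: pvRepl6 "DJANGO".toList "THEORY".toList
                      (pvRepl6 "django".toList "theory".toList
                        (pvRepl6 "Django".toList "Theory".toList t)) := by
                rw [pvRepl6, if_neg ?hneg]
                case hneg =>
                  intro hp
                  rw [show ("DJANGO".toList : List Char) = 'D' :: "JANGO".toList from rfl,
                      List.cons_prefix_cons] at hp
                  obtain ⟨rfl, hp'⟩ := hp
                  have s1 := pvReflt "JANGO".toList (by decide) _ _ (List.suffix_refl _) hp'
                  have s2 := pvReflT "JANGO".toList (by decide) t _ (List.suffix_refl _) s1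
                  exact h3 (by
                    rw [show ("DJANGO".toList : List Char) = 'D' :: "JANGO".toList from rfl]
                    exact List.cons_prefix_cons.mpr ⟨rfl, s2⟩)
              rw [e1, e2, e3, ih t (by simp at hlen; omega),
                  pvConvMiss c t h1 h2 h3]
  intro s
  exact key s.length s le_rfl

-- ===== VERDICT (by name: the statement is the Claim_ definition above) =====
theorem convertDjango_py_spec : Claim_equal_convertDjango_py := by
  intro lines _
  unfold Spec_convertDjango_py convertDjango_py convertDjango_py_alt
  rw [PySem.List.foldl_append_singleton_eq_map]
  apply List.map_congr_left
  intro s _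
  simp only [PySem.Str.replace, String.toList_ofList]
  rw [pvReplace_eq _ _ (by decide), pvReplace_eq _ _ (by decide),
      pvReplace_eq _ _ (by decide), pvMain]
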